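-- pv_equiv track=rewrite | github.com/gerquinn1978/gvm | grounded-vibe-methodology/skills/gvm-design-system/scripts/test_methodology_hardening_v2_1_0.py | _hard_gate_8_section
-- ===== SOURCE A (Python) =====
-- def _hard_gate_8_section(skill_text: str) -> str:
--     """Return the slice of SKILL.md belonging to the Hard Gate 8 entry.
--
--     Anchors on the verbatim opener used in SKILL.md so the helper cannot
--     silently match a `8. **` numbered list item from a changelog, Key Rules,
--     or any other section preceding the Hard Gates list. Stops at the next
--     'Verification:' line or following Markdown section header.
--     """
--     anchor = "8. **CHUNK-LEVEL ACCEPTANCE SMOKE GATE"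
--     idx = skill_text.find(anchor)
--     if idx == -1:
--         return ""
--     rest = skill_text[idx:]
--     # Earliest-position termination, not first-match-wins (Code-review R54
--     # #5): if a future edit inserts a Markdown subsection between Hard
--     # Gate 8 and the `Verification:` line, returning at the first listed
--     # terminator (`\nVerification:`) would silently extend the captured
--     # slice across the section boundary. Use min() over all candidates so
--     # the helper terminates at whichever boundary appears first in the
--     # text, regardless of declaration order.
--     candidates = [
--         pos
--         for pos in (
--             rest.find(t) for t in ("\nVerification:", "\n## Expert Panel", "\n## ")
--         )
--         if pos != -1
--     ]
--     if not candidates: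
--         return rest
--     return rest[: min(candidates)]
-- ===== SOURCE B (Python) =====
-- def _hard_gate_8_section(skill_text: str) -> str:
--     """Line-oriented slice of SKILL.md belonging to the Hard Gate 8 entry.
--
--     Splits the text after the anchor into lines and keeps lines until the
--     first boundary line, i.e. one starting with 'Verification:' or '## '
--     (which also covers '## Expert Panel').
--     """
--     anchor = "8. **CHUNK-LEVEL ACCEPTANCE SMOKE GATE"
--     idx = skill_text.find(anchor)
--     if idx == -1:
--         return ""
--     lines = skill_text[idx:].split("\n")
--     kept = [lines[0]]
--     for line in lines[1:]:
--         if line.startswith(("Verification:", "## ")):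
--             break
--         kept.append(line)
--     return "\n".join(kept)
-- ===== Notes on version B (the rewrite author's own statement) =====
-- stated objective: alternative
-- what changed: Replaces A's three whole-text substring scans plus list/min() reduction by a line-oriented pass: split the text after the anchor into lines, keep lines up to the first boundary line (startswith 'Verification:' or '## ', which subsumes '## Expert Panel'), and rejoin with newlines.
import Mathlib
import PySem

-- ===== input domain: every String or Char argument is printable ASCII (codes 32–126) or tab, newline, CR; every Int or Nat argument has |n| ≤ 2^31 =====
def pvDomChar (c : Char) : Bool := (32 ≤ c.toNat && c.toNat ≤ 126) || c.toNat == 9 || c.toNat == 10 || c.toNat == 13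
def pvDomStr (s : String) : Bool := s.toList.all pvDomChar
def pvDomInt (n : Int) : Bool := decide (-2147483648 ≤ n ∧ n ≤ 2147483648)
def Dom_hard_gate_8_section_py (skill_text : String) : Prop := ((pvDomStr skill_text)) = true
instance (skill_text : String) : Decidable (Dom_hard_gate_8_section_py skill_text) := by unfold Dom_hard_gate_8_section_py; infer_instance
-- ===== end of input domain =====

-- B replaces A's three whole-text substring scans + list/min reduction by a line-oriented pass:
-- split the text after the anchor into lines, keep lines up to the first boundary line
-- (startswith "Verification:" or "## ", which subsumes "## Expert Panel"), rejoin with newlines;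
-- objective: alternative, same return value.

-- ===== PORT A =====
def pvAnchor : List Char := "8. **CHUNK-LEVEL ACCEPTANCE SMOKE GATE".toList
def pvT1 : List Char := "\nVerification:".toList
def pvT2 : List Char := "\n## Expert Panel".toList
def pvT3 : List Char := "\n## ".toList

def hard_gate_8_section_py (skill_text : String) : String :=
  let idx := PySem.Chars.find skill_text.toList pvAnchor
  if idx = -1 then ""
  else
    let rest := PySem.List.slice skill_text.toList (some idx) none
    let candidates :=
      (([pvT1, pvT2, pvT3].map (fun t => PySem.Chars.find rest t)).filter
        (fun pos => !(pos == -1)))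
    match PySem.List.min? candidates id with
    | none => String.ofList rest
    | some m => String.ofList (PySem.List.slice rest none (some m))

-- ===== PORT B =====
def pvTailV : List Char := "Verification:".toList
def pvTailH : List Char := "## ".toList

-- line.startswith(("Verification:", "## "))
def pvBoundary (l : List Char) : Bool :=
  PySem.Chars.startswith l pvTailV || PySem.Chars.startswith l pvTailH

def hard_gate_8_section_py_alt (skill_text : String) : String :=
  let idx := PySem.Chars.find skill_text.toList pvAnchor
  if idx = -1 then ""
  else
    let rest := PySem.List.slice skill_text.toList (some idx) none
    -- rest.split("\n"): Python's one-character str.split IS Mathlib's List.splitOn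
    let lines := rest.splitOn '\n'
    -- kept = [lines[0]]; for line in lines[1:]: break on a boundary line, else append
    -- (splitOn never returns [], so lines[0] is lines.headI); "\n".join(kept)
    String.ofList
      (PySem.Chars.join ['\n'] (lines.headI :: lines.tail.takeWhile (fun l => !pvBoundary l)))

-- ===== PRECONDITION & SPEC =====
def Spec_hard_gate_8_section_py (skill_text : String) (out : String) : Prop := out = hard_gate_8_section_py_alt skill_text
instance (skill_text : String) (out : String) : Decidable (Spec_hard_gate_8_section_py skill_text out) := by unfold Spec_hard_gate_8_section_py; infer_instance

-- ===== CLAIM (what is proved, stated in full; the proofs are below) =====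
def Claim_equal_hard_gate_8_section_py : Prop := ∀ (skill_text : String), Dom_hard_gate_8_section_py skill_text → Spec_hard_gate_8_section_py skill_text (hard_gate_8_section_py skill_text)

-- ===== LEMMAS AND PROOFS =====

-- "some terminator matches at the head of l"
def pvPA (l : List Char) : Prop := pvT1 <+: l ∨ pvT2 <+: l ∨ pvT3 <+: l

def pvHit (l : List Char) : Bool :=
  pvT1.isPrefixOf l || pvT2.isPrefixOf l || pvT3.isPrefixOf l

-- leftmost position where some terminator matches, none if no match
def pvScan : List Char → Nat → Option Nat
  | [], _ => none
  | c :: cs, i => if pvHit (c :: cs) then some i else pvScan cs (i + 1)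

-- A's slice result, expressed through pvScan
def pvChop (l : List Char) : List Char :=
  match pvScan l 0 with
  | some i => l.take i
  | none => l

lemma pvHit_iff (l : List Char) : pvHit l = true ↔ pvPA l := by
  simp [pvHit, pvPA, List.isPrefixOf_iff_prefix, or_assoc]

lemma pvPA_nil : ¬ pvPA [] := by unfold pvPA; decide

lemma pvScan_none_iff (l : List Char) (i : Nat) :
    pvScan l i = none ↔ ∀ j, ¬ pvPA (l.drop j) := by
  induction l generalizing i with
  | nil => simp [pvScan, pvPA_nil]
  | cons c cs ih =>
    by_cases h : pvHit (c :: cs) = true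
    · simp only [pvScan]
      rw [if_pos h]
      constructor
      · intro hc; cases hc
      · intro hall; exact absurd ((pvHit_iff _).mp h) (by simpa using hall 0)
    · simp only [pvScan]
      rw [if_neg h, ih (i + 1)]
      constructor
      · intro hall j
        cases j with
        | zero =>
          simp only [List.drop_zero]
          exact fun hp => h ((pvHit_iff _).mpr hp)
        | succ j => simpa using hall j
      · intro hall j; simpa using hall (j + 1)

lemma pvScan_some (l : List Char) (i k : Nat) (h : pvScan l i = some k) :
    i ≤ k ∧ pvPA (l.drop (k - i)) ∧ ∀ j < k - i, ¬ pvPA (l.drop j) := by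
  induction l generalizing i with
  | nil => simp [pvScan] at h
  | cons c cs ih =>
    by_cases hh : pvHit (c :: cs) = true
    · simp only [pvScan] at h
      rw [if_pos hh] at h
      obtain rfl : i = k := by injection h
      refine ⟨le_refl _, by simpa using (pvHit_iff _).mp hh, ?_⟩
      intro j hj; omega
    · simp only [pvScan] at h
      rw [if_neg hh] at h
      obtain ⟨hle, hpa, hmin⟩ := ih (i + 1) h
      refine ⟨by omega, ?_, ?_⟩
      · have he : k - i = (k - (i + 1)) + 1 := by omega
        rw [he]; simpa using hpa
      · intro j hj
        cases j with
        | zero =>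
          simp only [List.drop_zero]
          exact fun hp => hh ((pvHit_iff _).mpr hp)
        | succ j =>
          have hlt : j < k - (i + 1) := by omega
          simpa using hmin j hlt

lemma pvScan_eq_some_of (l : List Char) (i : Nat)
    (hpa : pvPA (l.drop i)) (hmin : ∀ j < i, ¬ pvPA (l.drop j)) :
    pvScan l 0 = some i := by
  cases h : pvScan l 0 with
  | none => exact absurd hpa ((pvScan_none_iff l 0).mp h i)
  | some k =>
    obtain ⟨-, hk, hkmin⟩ := pvScan_some l 0 k h
    simp only [Nat.sub_zero] at hk hkmin
    have : k = i := by
      rcases lt_trichotomy k i with hlt | heq | hgt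
      · exact absurd hk (hmin k hlt)
      · exact heq
      · exact absurd hpa (hkmin i hgt)
    rw [this]

-- find l t = -1 means t is never a prefix of any suffix of l
lemma pv_find_neg_one_no_prefix (l t : List Char) (h : PySem.Chars.find l t = -1) :
    ∀ j, ¬ t <+: l.drop j := by
  intro j hp
  have hin : t <:+: l := (PySem.Chars.isIn_iff_infix t l).mp
    ((PySem.Chars.exists_prefix_drop_iff_isIn t l).mp ⟨j, hp⟩)
  exact (PySem.Chars.find_eq_neg_one_iff l t).mp h hin

-- a prefix match at position j bounds find from above by j
lemma pv_find_le_of_prefix (l t : List Char) (j : Nat) (hp : t <+: l.drop j) :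
    0 ≤ PySem.Chars.find l t ∧ (PySem.Chars.find l t).toNat ≤ j := by
  have hin : t <:+: l := (PySem.Chars.isIn_iff_infix t l).mp
    ((PySem.Chars.exists_prefix_drop_iff_isIn t l).mp ⟨j, hp⟩)
  have hnn : 0 ≤ PySem.Chars.find l t := (PySem.Chars.find_nonneg_iff l t).mpr hin
  refine ⟨hnn, ?_⟩
  by_contra hlt
  exact ((PySem.Chars.find_spec hnn).2 j (by omega)) hp

-- A's min-over-finds slice equals the leftmost-terminator chop
lemma pv_core_eq (l : List Char) :
    (match PySem.List.min?
        (([pvT1, pvT2, pvT3].map (fun t => PySem.Chars.find l t)).filter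
          (fun pos => !(pos == -1))) id with
      | none => String.ofList l
      | some m => String.ofList (PySem.List.slice l none (some m)))
    = String.ofList (pvChop l) := by
  set cands := ([pvT1, pvT2, pvT3].map (fun t => PySem.Chars.find l t)).filter
      (fun pos => !(pos == -1)) with hcands
  have mem_cands : ∀ x : Int, x ∈ cands ↔
      ((x = PySem.Chars.find l pvT1 ∨ x = PySem.Chars.find l pvT2 ∨ x = PySem.Chars.find l pvT3)
        ∧ x ≠ -1) := by
    intro x
    rw [hcands, List.mem_filter]
    simp only [List.mem_map, List.mem_cons, List.not_mem_nil, or_false,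
      Bool.not_eq_eq_eq_not, Bool.not_true, beq_eq_false_iff_ne, ne_eq]
    constructor
    · rintro ⟨⟨t, (rfl | rfl | rfl), rfl⟩, hne⟩ <;> exact ⟨by tauto, hne⟩
    · rintro ⟨(rfl | rfl | rfl), hne⟩
      · exact ⟨⟨pvT1, by tauto, rfl⟩, hne⟩
      · exact ⟨⟨pvT2, by tauto, rfl⟩, hne⟩
      · exact ⟨⟨pvT3, by tauto, rfl⟩, hne⟩
  unfold pvChop
  cases hmin : PySem.List.min? cands id with
  | none =>
    have hnil : cands = [] := (PySem.List.min?_eq_none_iff _ _).mp hmin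
    have hall : ∀ j, ¬ pvPA (l.drop j) := by
      intro j hpa
      have hmem : ∀ t, t = pvT1 ∨ t = pvT2 ∨ t = pvT3 → PySem.Chars.find l t = -1 := by
        intro t ht
        by_contra hne
        have hx : PySem.Chars.find l t ∈ cands := by
          rw [mem_cands]
          rcases ht with rfl | rfl | rfl <;> exact ⟨by tauto, hne⟩
        simp [hnil] at hx
      rcases hpa with hp | hp | hp
      · exact pv_find_neg_one_no_prefix l pvT1 (hmem _ (Or.inl rfl)) j hp
      · exact pv_find_neg_one_no_prefix l pvT2 (hmem _ (Or.inr (Or.inl rfl))) j hp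
      · exact pv_find_neg_one_no_prefix l pvT3 (hmem _ (Or.inr (Or.inr rfl))) j hp
    have hscan : pvScan l 0 = none := (pvScan_none_iff l 0).mpr hall
    simp [hscan]
  | some m =>
    have hm_mem : m ∈ cands := PySem.List.min?_mem hmin
    have hm_min : ∀ y ∈ cands, m ≤ y := fun y hy => PySem.List.min?_isMin hmin y hy
    obtain ⟨hm_eq, hm_ne⟩ := (mem_cands m).mp hm_mem
    have hm_nonneg : 0 ≤ m := by
      rcases hm_eq with h | h | h <;> subst h
      · have := PySem.Chars.neg_one_le_find l pvT1; omega
      · have := PySem.Chars.neg_one_le_find l pvT2; omega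
      · have := PySem.Chars.neg_one_le_find l pvT3; omega
    have hpa_m : pvPA (l.drop m.toNat) := by
      rcases hm_eq with h | h | h <;> rw [h] at hm_nonneg ⊢
      · exact Or.inl (PySem.Chars.find_spec hm_nonneg).1
      · exact Or.inr (Or.inl (PySem.Chars.find_spec hm_nonneg).1)
      · exact Or.inr (Or.inr (PySem.Chars.find_spec hm_nonneg).1)
    cases hscan : pvScan l 0 with
    | none => exact absurd hpa_m ((pvScan_none_iff l 0).mp hscan m.toNat)
    | some k =>
      obtain ⟨-, hpa_k, hmin_k⟩ := pvScan_some l 0 k hscan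
      simp only [Nat.sub_zero] at hpa_k hmin_k
      have hk_le : k ≤ m.toNat := by
        by_contra h
        exact hmin_k m.toNat (by omega) hpa_m
      have hm_le : m.toNat ≤ k := by
        have step : ∀ t, (t = pvT1 ∨ t = pvT2 ∨ t = pvT3) → t <+: l.drop k →
            m.toNat ≤ k := by
          intro t ht hp
          obtain ⟨hnn, hle⟩ := pv_find_le_of_prefix l t k hp
          have hc : PySem.Chars.find l t ∈ cands := by
            rw [mem_cands]
            rcases ht with rfl | rfl | rfl <;> exact ⟨by tauto, by omega⟩
          have := hm_min _ hc
          omega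
        rcases hpa_k with hp | hp | hp
        · exact step pvT1 (Or.inl rfl) hp
        · exact step pvT2 (Or.inr (Or.inl rfl)) hp
        · exact step pvT3 (Or.inr (Or.inr rfl)) hp
      have hk : k = m.toNat := by omega
      show String.ofList (PySem.List.slice l none (some m)) = String.ofList (l.take k)
      rw [PySem.List.slice_to l hm_nonneg, hk]

-- terminator shapes
lemma pvT1_eq : pvT1 = '\n' :: pvTailV := by decide
lemma pvT3_eq : pvT3 = '\n' :: pvTailH := by decide
lemma pvT3_pre_T2 : pvT3 <+: pvT2 := by decide
lemma pvTailV_free : '\n' ∉ pvTailV := by decide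
lemma pvTailH_free : '\n' ∉ pvTailH := by decide

-- any terminator match starts with a newline
lemma pvPA_head? (X : List Char) (h : pvPA X) : X.head? = some '\n' := by
  have : ∃ t s, ('\n' :: t) ++ s = X := by
    rcases h with ⟨s, hs⟩ | ⟨s, hs⟩ | ⟨s, hs⟩
    · exact ⟨pvTailV, s, by rw [← pvT1_eq, hs]⟩
    · exact ⟨"## Expert Panel".toList, s, by rw [show '\n' :: "## Expert Panel".toList = pvT2 by decide, hs]⟩
    · exact ⟨pvTailH, s, by rw [← pvT3_eq, hs]⟩
  obtain ⟨t, s, hts⟩ := this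
  rw [← hts]; rfl

-- a newline-free list has no terminator match anywhere
lemma pv_no_hit_of_free (m : List Char) (hm : '\n' ∉ m) : ∀ j, ¬ pvPA (m.drop j) := by
  intro j hp
  have hh := pvPA_head? _ hp
  rw [List.head?_drop] at hh
  exact hm (List.mem_of_getElem? hh)

-- a newline-free pattern matches across a line boundary iff it matches the first line
lemma pv_prefix_break (t : List Char) (ht : '\n' ∉ t) (a : List Char) (w : List Char) :
    t <+: a ++ '\n' :: w ↔ t <+: a := by
  induction a generalizing t with
  | nil =>
    simp only [List.nil_append]
    constructor
    · intro h
      cases t with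
      | nil => exact List.nil_prefix
      | cons c t' =>
        rw [List.cons_prefix_cons] at h
        exact absurd (h.1 ▸ List.mem_cons_self) ht
    · intro h
      have := List.prefix_nil.mp h
      simp [this]
  | cons x a' ih =>
    cases t with
    | nil => simp
    | cons c t' =>
      simp only [List.cons_append, List.cons_prefix_cons]
      constructor
      · rintro ⟨rfl, h⟩
        exact ⟨rfl, (ih t' (fun hm => ht (List.mem_cons_of_mem _ hm))).mp h⟩
      · rintro ⟨rfl, h⟩
        exact ⟨rfl, (ih t' (fun hm => ht (List.mem_cons_of_mem _ hm))).mpr h⟩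

-- a terminator match right after a newline is a boundary test on the tail
lemma pvPA_cons_iff (w : List Char) :
    pvPA ('\n' :: w) ↔ (pvTailV <+: w ∨ pvTailH <+: w) := by
  constructor
  · rintro (h | h | h)
    · rw [pvT1_eq, List.cons_prefix_cons] at h; exact Or.inl h.2
    · have := pvT3_pre_T2.trans h
      rw [pvT3_eq, List.cons_prefix_cons] at this; exact Or.inr this.2
    · rw [pvT3_eq, List.cons_prefix_cons] at h; exact Or.inr h.2
  · rintro (h | h)
    · exact Or.inl (by rw [pvT1_eq]; exact List.cons_prefix_cons.mpr ⟨rfl, h⟩)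
    · exact Or.inr (Or.inr (by rw [pvT3_eq]; exact List.cons_prefix_cons.mpr ⟨rfl, h⟩))

-- boundary test through intercalate: the head line decides
lemma pv_pre_inter (t : List Char) (ht : '\n' ∉ t) (l1 : List Char) (ls : List (List Char)) :
    t <+: List.intercalate ['\n'] (l1 :: ls) ↔ t <+: l1 := by
  cases ls with
  | nil => simp [List.intercalate]
  | cons l2 ls' =>
    have : List.intercalate ['\n'] (l1 :: l2 :: ls') =
        l1 ++ '\n' :: List.intercalate ['\n'] (l2 :: ls') := by
      simp [List.intercalate]
    rw [this, pv_prefix_break t ht]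

lemma pvBoundary_iff (l : List Char) :
    pvBoundary l = true ↔ (pvTailV <+: l ∨ pvTailH <+: l) := by
  simp [pvBoundary, PySem.Chars.startswith_iff]

-- the main bridge: leftmost-terminator chop = line-keeping pass, on line-decomposed text
lemma pv_chop_inter (l0 : List Char) (ls : List (List Char))
    (h0 : '\n' ∉ l0) (hls : ∀ l ∈ ls, '\n' ∉ l) :
    pvChop (List.intercalate ['\n'] (l0 :: ls))
      = List.intercalate ['\n'] (l0 :: ls.takeWhile (fun l => !pvBoundary l)) := by
  induction ls generalizing l0 with
  | nil =>
    have hs : pvScan (List.intercalate ['\n'] [l0]) 0 = none := by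
      rw [pvScan_none_iff]
      simpa [List.intercalate] using pv_no_hit_of_free l0 h0
    simp [pvChop, hs]
  | cons l1 ls' ih =>
    have h1 : '\n' ∉ l1 := hls l1 List.mem_cons_self
    have hls' : ∀ l ∈ ls', '\n' ∉ l := fun l hl => hls l (List.mem_cons_of_mem _ hl)
    set r' := List.intercalate ['\n'] (l1 :: ls') with hr'
    have hr : List.intercalate ['\n'] (l0 :: l1 :: ls') = l0 ++ '\n' :: r' := by
      simp [List.intercalate, hr']
    -- no match inside the first line
    have hlow : ∀ j < l0.length, ¬ pvPA ((l0 ++ '\n' :: r').drop j) := by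
      intro j hj hp
      have hh := pvPA_head? _ hp
      rw [List.head?_drop, List.getElem?_append_left hj] at hh
      exact h0 (List.mem_of_getElem? hh)
    -- the match at the line boundary is the boundary test on l1
    have hbnd : pvPA (('\n' :: r')) ↔ pvBoundary l1 = true := by
      rw [pvPA_cons_iff, pvBoundary_iff, hr',
        pv_pre_inter pvTailV pvTailV_free, pv_pre_inter pvTailH pvTailH_free]
    have hdropb : (l0 ++ '\n' :: r').drop l0.length = '\n' :: r' := by
      simp
    have hshift : ∀ j, (l0 ++ '\n' :: r').drop (l0.length + 1 + j) = r'.drop j := by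
      intro j
      rw [show l0.length + 1 + j = l0.length + (1 + j) by omega, List.drop_append]
      have he : List.drop (l0.length + (1 + j)) l0 = [] := List.drop_eq_nil_of_le (by omega)
      rw [he, show l0.length + (1 + j) - l0.length = j + 1 by omega]
      simp
    rw [hr]
    by_cases hb : pvBoundary l1 = true
    · have hscan : pvScan (l0 ++ '\n' :: r') 0 = some l0.length := by
        apply pvScan_eq_some_of
        · rw [hdropb]; exact hbnd.mpr hb
        · exact hlow
      have : pvChop (l0 ++ '\n' :: r') = l0 := by
        simp [pvChop, hscan]
      rw [this]
      simp [hb, List.intercalate]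
    · have htw : (l1 :: ls').takeWhile (fun l => !pvBoundary l)
          = l1 :: ls'.takeWhile (fun l => !pvBoundary l) := by
        simp [hb]
      have hstep : pvChop (l0 ++ '\n' :: r') = l0 ++ '\n' :: pvChop r' := by
        cases hs' : pvScan r' 0 with
        | none =>
          have hall' := (pvScan_none_iff r' 0).mp hs'
          have hall : ∀ j, ¬ pvPA ((l0 ++ '\n' :: r').drop j) := by
            intro j
            rcases lt_trichotomy j l0.length with hj | hj | hj
            · exact hlow j hj
            · rw [hj, hdropb]; exact fun hp => hb (hbnd.mp hp)
            · have : j = l0.length + 1 + (j - l0.length - 1) := by omega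
              rw [this, hshift]; exact hall' _
          have hscan : pvScan (l0 ++ '\n' :: r') 0 = none := (pvScan_none_iff _ 0).mpr hall
          simp [pvChop, hscan, hs']
        | some i =>
          obtain ⟨-, hpa, hmin⟩ := pvScan_some r' 0 i hs'
          simp only [Nat.sub_zero] at hpa hmin
          have hscan : pvScan (l0 ++ '\n' :: r') 0 = some (l0.length + 1 + i) := by
            apply pvScan_eq_some_of
            · rw [hshift]; exact hpa
            · intro j hj
              rcases lt_trichotomy j l0.length with hlt | heq | hgt
              · exact hlow j hlt
              · rw [heq, hdropb]; exact fun hp => hb (hbnd.mp hp)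
              · have : j = l0.length + 1 + (j - l0.length - 1) := by omega
                rw [this, hshift]; exact hmin _ (by omega)
          have htake : (l0 ++ '\n' :: r').take (l0.length + 1 + i)
              = l0 ++ '\n' :: r'.take i := by
            rw [show l0.length + 1 + i = l0.length + (1 + i) by omega, List.take_append]
            have he : List.take (l0.length + (1 + i)) l0 = l0 := List.take_of_length_le (by omega)
            rw [he, show l0.length + (1 + i) - l0.length = i + 1 by omega]
            simp
          simp [pvChop, hscan, hs', htake]
      rw [hstep, ih l1 h1 hls', htw]
      simp [List.intercalate]

-- every piece of a newline split is newline-free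
lemma pv_splitOn_free (xs : List Char) : ∀ l ∈ xs.splitOn '\n', '\n' ∉ l := by
  induction xs with
  | nil => intro l hl; rw [List.splitOn_nil] at hl; simp at hl; simp [hl]
  | cons x xs ih =>
    intro l hl
    by_cases hx : x = '\n'
    · rw [List.splitOn, List.splitOnP_cons] at hl
      simp only [hx, beq_self_eq_true, if_pos] at hl
      rcases List.mem_cons.mp hl with rfl | hl'
      · simp
      · exact ih l hl'
    · rw [List.splitOn, List.splitOnP_cons] at hl
      have hxe : ((x == '\n') : Bool) = false := by simp [hx]
      rw [if_neg (by simp [hxe])] at hl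
      obtain ⟨h, t, hht0⟩ := List.exists_cons_of_ne_nil (List.splitOnP_ne_nil (fun b => b == '\n') xs)
      have hht : List.splitOn '\n' xs = h :: t := by rw [List.splitOn]; exact hht0
      rw [hht0, List.modifyHead_cons] at hl
      rcases List.mem_cons.mp hl with rfl | hl'
      · intro hmem
        rcases List.mem_cons.mp hmem with rfl | hmem'
        · exact hx rfl
        · exact ih h (by rw [hht]; exact List.mem_cons_self) hmem'
      · exact ih l (by rw [hht]; exact List.mem_cons_of_mem _ hl')

-- the two ports agree
theorem pv_ports_eq (s : String) :
    hard_gate_8_section_py s = hard_gate_8_section_py_alt s := by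
  unfold hard_gate_8_section_py hard_gate_8_section_py_alt
  by_cases h : PySem.Chars.find s.toList pvAnchor = -1
  · simp [h]
  · simp only [if_neg h]
    set rest := PySem.List.slice s.toList (some (PySem.Chars.find s.toList pvAnchor)) none
      with hrest
    obtain ⟨l0, ls, hsp⟩ := List.exists_cons_of_ne_nil (List.splitOnP_ne_nil _ rest)
    have hfree := pv_splitOn_free rest
    rw [show rest.splitOn '\n' = List.splitOnP (fun a => a == '\n') rest from rfl] at hfree ⊢
    rw [hsp] at hfree ⊢
    have hinter : List.intercalate ['\n'] (l0 :: ls) = rest := by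
      have := List.intercalate_splitOn (x := '\n') (xs := rest)
      rw [show rest.splitOn '\n' = List.splitOnP (fun a => a == '\n') rest from rfl, hsp] at this
      exact this
    rw [pv_core_eq, ← hinter,
      pv_chop_inter l0 ls (hfree l0 List.mem_cons_self)
        (fun l hl => hfree l (List.mem_cons_of_mem _ hl))]
    simp [PySem.Chars.join]

-- ===== VERDICT (by name: the statement is the Claim_ definition above) =====
theorem hard_gate_8_section_py_spec : Claim_equal_hard_gate_8_section_py := by
  intro s _
  unfold Spec_hard_gate_8_section_py
  exact pv_ports_eq s
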